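-- pv_equiv track=rewrite | github.com/rfire12/apriori-algorithm | main.py | create_rule_set
-- ===== SOURCE A (Python) =====
-- from itertools import combinations
--
-- def combinations_to_string(items):
--     items_key = list(map(lambda item: ",".join(item), items))
--     return items_key
--
-- def create_rule_set(items):
--     rule_set = {}
--     for combination_size in range(1, len(items)):
--         keys_list = list(combinations(items, combination_size))
--         keys = combinations_to_string(keys_list)
--
--         for key in keys:
--             keys_list = key.split(",")
--             rule_set[key] = []
--             for item in items:
--                 if item not in keys_list:
--                     rule_set[key].append(item)
--
--     return rule_set
-- ===== SOURCE B (Python) =====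
-- def create_rule_set(items):
--     # One DFS over the items builds every combination along the path; the rules are
--     # then emitted grouped by combination size, each key mapped to the items outside it.
--     n = len(items)
--     subsets = []
--
--     def walk(rest, included):
--         if not rest:
--             if included and len(included) < n:
--                 subsets.append(included)
--             return
--         walk(rest[1:], included + [rest[0]])
--         walk(rest[1:], included)
--
--     walk(items, [])
--     rules = {}
--     for size in range(1, n):
--         for c in subsets:
--             if len(c) == size:
--                 key = ",".join(c)
--                 rules[key] = [item for item in items if item not in key.split(",")]
--     return rules
-- ===== Notes on version B (the rewrite author's own statement) =====
-- stated objective: alternative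
-- what changed: Replaces the per-size itertools.combinations enumeration by a single recursive DFS over the items that builds every combination along the path, then groups the combinations by size to emit the rule set.
import Mathlib
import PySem

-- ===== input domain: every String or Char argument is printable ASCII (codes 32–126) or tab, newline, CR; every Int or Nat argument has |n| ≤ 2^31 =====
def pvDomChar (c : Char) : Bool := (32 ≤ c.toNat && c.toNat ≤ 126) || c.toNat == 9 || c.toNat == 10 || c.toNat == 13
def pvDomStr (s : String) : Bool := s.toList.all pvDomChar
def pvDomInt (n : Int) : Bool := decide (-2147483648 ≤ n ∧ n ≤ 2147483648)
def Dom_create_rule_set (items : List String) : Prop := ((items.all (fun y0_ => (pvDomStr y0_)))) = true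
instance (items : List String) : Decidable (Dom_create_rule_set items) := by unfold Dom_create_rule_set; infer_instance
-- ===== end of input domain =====

-- B replaces A's per-size itertools.combinations enumeration by a single recursive DFS
-- over the items that builds every combination along the path, then emits the rules
-- grouped by combination size (objective: alternative algorithm, similar cost).

-- ===== PORT A =====
-- itertools.combinations(items, k), in itertools' order
def combosA : Nat → List String → List (List String)
  | 0, _ => [[]]
  | _ + 1, [] => []
  | k + 1, x :: xs => (combosA k xs).map (fun c => x :: c) ++ combosA (k + 1) xs

def combinations_to_string (items : List (List String)) : List String :=
  items.map (fun item => PySem.Str.join "," item)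

def create_rule_set (items : List String) : List (String × List String) :=
  ((PySem.List.pyRange 1 (items.length : Int) 1).foldl
      (fun (d : PySem.Dict String (List String)) combination_size =>
        let keys_list := combosA combination_size.toNat items
        let keys := combinations_to_string keys_list
        keys.foldl (fun d key =>
          let kl := (PySem.Str.split? key ",").getD []   -- sep "," nonempty: split? is always some
          let d := d.insert key []
          d.insert key (items.foldl
            (fun acc item => if kl.contains item then acc else acc ++ [item]) [])) d)
    PySem.Dict.empty).items

-- ===== PORT B =====
def walkB (n : Nat) : List String → List String → List (List String)
  | [], included => if included ≠ [] ∧ included.length < n then [included] else []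
  | x :: rest, included => walkB n rest (included ++ [x]) ++ walkB n rest included

def create_rule_set_alt (items : List String) : List (String × List String) :=
  let n := items.length
  let subsets := walkB n items []
  ((PySem.List.pyRange 1 (n : Int) 1).foldl
      (fun (d : PySem.Dict String (List String)) size =>
        subsets.foldl (fun d c =>
          if (c.length : Int) = size then
            let key := PySem.Str.join "," c
            d.insert key (items.filter (fun item =>
              !(((PySem.Str.split? key ",").getD []).contains item)))
          else d) d)
    PySem.Dict.empty).items

-- ===== PRECONDITION & SPEC =====
def Spec_create_rule_set (items : List String) (out : List (String × List String)) : Prop :=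
  out = create_rule_set_alt items
instance (items : List String) (out : List (String × List String)) :
    Decidable (Spec_create_rule_set items out) := by unfold Spec_create_rule_set; infer_instance

-- ===== CLAIM (what is proved, stated in full; the proofs are below) =====
def Claim_equal_create_rule_set : Prop := ∀ (items : List String), Dom_create_rule_set items →
  Spec_create_rule_set items (create_rule_set items)

-- ===== LEMMAS AND PROOFS =====

-- all subsets of the list, include-first DFS order
def subs : List String → List (List String)
  | [] => [[]]
  | x :: xs => (subs xs).map (fun c => x :: c) ++ subs xs

-- ---- DFS facts ----

theorem walkB_eq (n : Nat) (xs : List String) : ∀ (inc : List String),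
    walkB n xs inc = (subs xs).filterMap
      (fun c => if inc ++ c ≠ [] ∧ (inc ++ c).length < n then some (inc ++ c) else none) := by
  induction xs with
  | nil =>
      intro inc
      simp only [subs, List.filterMap_cons, List.filterMap_nil]
      by_cases hi : inc = [] <;> by_cases hl : inc.length < n <;>
        simp [walkB, hi, hl]
  | cons x xs ih =>
      intro inc
      simp only [walkB, subs, ih, List.filterMap_append, List.filterMap_map]
      congr 1
      apply List.filterMap_congr
      intro c _
      simp [List.append_assoc]

theorem walkB_nil (n : Nat) (xs : List String) :
    walkB n xs [] = (subs xs).filter (fun c => decide (c ≠ [] ∧ c.length < n)) := by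
  rw [walkB_eq n xs []]
  have gen : ∀ (l : List (List String)),
      l.filterMap (fun c => if c ≠ [] ∧ c.length < n then some c else none)
        = l.filter (fun c => decide (c ≠ [] ∧ c.length < n)) := by
    intro l
    induction l with
    | nil => rfl
    | cons c l ih =>
        by_cases hc : c ≠ [] ∧ c.length < n <;> simp [hc, ih]
  rw [← gen (subs xs)]
  apply List.filterMap_congr
  intro c _
  simp

theorem subs_filter_len (xs : List String) : ∀ (k : Nat),
    (subs xs).filter (fun c => decide (c.length = k)) = combosA k xs := by
  induction xs with
  | nil =>
      intro k
      cases k with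
      | zero => simp [subs, combosA]
      | succ k => simp [subs, combosA]
  | cons x xs ih =>
      intro k
      cases k with
      | zero =>
          simp only [subs, List.filter_append, List.filter_map]
          have e1 : ((fun c : List String => decide (c.length = 0)) ∘
              fun c : List String => x :: c) = fun _ => false := by
            funext c; simp
          rw [e1, List.filter_false, ih 0]
          simp [combosA]
      | succ k =>
          simp only [subs, List.filter_append, List.filter_map]
          have e1 : ((fun c : List String => decide (c.length = k + 1)) ∘
              fun c : List String => x :: c) = fun c : List String => decide (c.length = k) := by
            funext c; simp
          rw [e1, ih k, ih (k + 1)]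
          simp [combosA]

-- ---- generic fold facts ----

theorem foldl_if_skip {α β : Type} (q : α → Prop) [DecidablePred q] (g : β → α → β) :
    ∀ (l : List α) (d : β),
      l.foldl (fun d x => if q x then g d x else d) d
        = (l.filter (fun x => decide (q x))).foldl g d := by
  intro l
  induction l with
  | nil => intro d; rfl
  | cons x xs ih =>
      intro d
      by_cases h : q x <;> simp [h, ih]

theorem foldl_skip_append {α : Type} (p : α → Bool) :
    ∀ (l : List α) (acc : List α),
      l.foldl (fun acc x => if p x then acc else acc ++ [x]) acc
        = acc ++ l.filter (fun x => !p x) := by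
  intro l
  induction l with
  | nil => intro acc; simp
  | cons x xs ih =>
      intro acc
      by_cases h : p x = true <;> simp [h, ih]

-- ---- the two inner loop bodies agree ----

theorem step_eq (items : List String) (sz : Int) (h1 : 1 ≤ sz)
    (h2 : sz < (items.length : Int)) (d : PySem.Dict String (List String)) :
    (combinations_to_string (combosA sz.toNat items)).foldl (fun d key =>
        (d.insert key []).insert key (items.foldl
          (fun acc item => if ((PySem.Str.split? key ",").getD []).contains item then acc
            else acc ++ [item]) [])) d
      = (walkB items.length items []).foldl (fun d c =>
          if (c.length : Int) = sz then
            d.insert (PySem.Str.join "," c) (items.filter (fun item =>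
              !(((PySem.Str.split? (PySem.Str.join "," c) ",").getD []).contains item)))
          else d) d := by
  have hk : ((sz.toNat : Int)) = sz := Int.toNat_of_nonneg (by omega)
  have hk2 : sz.toNat < items.length := by omega
  have hk1 : 1 ≤ sz.toNat := by omega
  have hfilters :
      (subs items).filter
          (fun c => decide ((c.length : Int) = sz) && decide (c ≠ [] ∧ c.length < items.length))
        = combosA sz.toNat items := by
    have h1' : (subs items).filter
          (fun c => decide ((c.length : Int) = sz) && decide (c ≠ [] ∧ c.length < items.length))
        = (subs items).filter (fun c => decide (c.length = sz.toNat)) := by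
      apply List.filter_congr
      intro c _
      by_cases h : c.length = sz.toNat
      · have hc1 : c ≠ [] := by intro he; rw [he] at h; simp at h; omega
        have hc2 : c.length < items.length := by omega
        simp [h, hc1]
        omega
      · have hc3 : ¬((c.length : Int) = sz) := by omega
        simp [h, hc3]
    rw [h1', subs_filter_len items sz.toNat]
  rw [walkB_nil, foldl_if_skip (fun c : List String => (c.length : Int) = sz),
    List.filter_filter, hfilters]
  simp only [combinations_to_string]
  rw [List.foldl_map]
  apply PySem.List.foldl_congr_mem
  intro d' c _hc
  rw [PySem.Dict.insert_insert_self,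
    foldl_skip_append
      (fun it => ((PySem.Str.split? (PySem.Str.join "," c) ",").getD []).contains it) items []]
  simp

-- ===== VERDICT (by name: the statement is the Claim_ definition above) =====
theorem create_rule_set_spec : Claim_equal_create_rule_set := by
  intro items _hdom
  unfold Spec_create_rule_set create_rule_set create_rule_set_alt
  congr 1
  apply PySem.List.foldl_congr_mem
  intro d sz hsz
  rw [PySem.List.mem_pyRange_one] at hsz
  exact step_eq items sz hsz.1 hsz.2 d
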